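-- pv_equiv track=rewrite | github.com/saurabhsaha91/factory-city | factory_city_code.py | sort_dic
-- ===== SOURCE A (Python) =====
-- import operator
--
-- def sort_dic(d,n):
--     """
--     Sorts the dictionary in ascending order by value and returns
--     list of the top n iems as tuples
--     """
--     #
--     #lisKey = list(set(d.keys()) - set(FIX_NAMES))
--     #d = {k:d[k] for k in d if k in lisKey}
--     count = 1
--     dic = sorted(d.items(), key=operator.itemgetter(1))
--     lisDic = []
--     for k in dic:
--         lisDic.append(k)
--         if(count>n-1):
--             break
--         count+=1
--     return lisDic
-- ===== SOURCE B (Python) =====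
-- import heapq, operator
--
-- def sort_dic(d, n):
--     """
--     Sorts the dictionary in ascending order by value and returns
--     list of the top n items as tuples
--     """
--     return heapq.nsmallest(n, d.items(), key=operator.itemgetter(1))
-- ===== Notes on version B (the rewrite author's own statement) =====
-- stated objective: alternative
-- what changed: B selects the n value-smallest items with a bounded heap (heapq.nsmallest) instead of fully sorting all items and truncating with a counting loop.
-- intended difference: On non-empty dicts with n <= 0, A still returns the single smallest-valued item (count starts at 1, so its loop always appends once); B returns [], the intended 'top n' for n <= 0. — e.g. on sort_dic([("a", 1)], 0): A returns [("a", 1)], B returns []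
import Mathlib
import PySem

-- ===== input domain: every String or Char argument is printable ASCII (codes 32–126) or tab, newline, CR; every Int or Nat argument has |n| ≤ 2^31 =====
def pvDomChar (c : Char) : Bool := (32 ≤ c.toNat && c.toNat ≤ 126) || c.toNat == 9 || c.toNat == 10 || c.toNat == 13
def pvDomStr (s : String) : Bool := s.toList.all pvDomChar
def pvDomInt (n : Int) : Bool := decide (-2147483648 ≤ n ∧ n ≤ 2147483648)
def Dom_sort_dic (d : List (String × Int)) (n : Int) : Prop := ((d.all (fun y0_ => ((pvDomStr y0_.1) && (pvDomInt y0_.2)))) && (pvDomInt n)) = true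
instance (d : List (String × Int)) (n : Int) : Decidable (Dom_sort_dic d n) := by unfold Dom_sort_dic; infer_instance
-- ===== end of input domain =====

-- B selects the n value-smallest items via heapq.nsmallest instead of A's full sort plus counting loop;
-- on non-empty input with n <= 0 A's loop still emits one item while B returns [] (stated as D_ below).


-- ===== PORT A =====
-- the for-loop over the sorted items with the count/break logic
def sortDicLoop (n : Int) : List (String × Int) → Int → List (String × Int) → List (String × Int)
  | [], _, lisDic => lisDic
  | k :: dic, count, lisDic =>
      let lisDic := lisDic ++ [k]
      if count > n - 1 then lisDic else sortDicLoop n dic (count + 1) lisDic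

def sort_dic (d : List (String × Int)) (n : Int) : List (String × Int) :=
  sortDicLoop n (PySem.List.sorted d (fun kv => kv.2)) 1 []

-- ===== PORT B =====
-- heapq.nsmallest(n, items, key) = sorted(items, key=key)[:max(n,0)] (its documented contract)
def sort_dic_alt (d : List (String × Int)) (n : Int) : List (String × Int) :=
  (PySem.List.sorted d (fun kv => kv.2)).take n.toNat

-- ===== PRECONDITION & SPEC =====
-- On non-empty d with n ≤ 0, A returns the single smallest-valued item (its count starts at 1 so the
-- loop always appends once); B returns [], the intended 'top n' result for n ≤ 0.
def D_sort_dic (d : List (String × Int)) (n : Int) : Prop := n < 1 ∧ d ≠ []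
instance (d : List (String × Int)) (n : Int) : Decidable (D_sort_dic d n) := by unfold D_sort_dic; infer_instance

def Spec_sort_dic (d : List (String × Int)) (n : Int) (out : List (String × Int)) : Prop :=
  ¬ D_sort_dic d n → out = sort_dic_alt d n
instance (d : List (String × Int)) (n : Int) (out : List (String × Int)) : Decidable (Spec_sort_dic d n out) := by unfold Spec_sort_dic; infer_instance

def pvDiffWitness_sort_dic : (List (String × Int)) × Int := ([("a", 1)], 0)
def pvDiffWitnessOut_sort_dic : (List (String × Int)) × (List (String × Int)) := ([("a", 1)], [])

-- ===== CLAIM (what is proved, stated in full; the proofs are below) =====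
def Claim_unchanged_sort_dic : Prop := ∀ (d : List (String × Int)) (n : Int), Dom_sort_dic d n → Spec_sort_dic d n (sort_dic d n)
def Claim_changed_sort_dic : Prop := Dom_sort_dic (pvDiffWitness_sort_dic.1) (pvDiffWitness_sort_dic.2) ∧ D_sort_dic (pvDiffWitness_sort_dic.1) (pvDiffWitness_sort_dic.2) ∧ sort_dic (pvDiffWitness_sort_dic.1) (pvDiffWitness_sort_dic.2) = pvDiffWitnessOut_sort_dic.1 ∧ sort_dic_alt (pvDiffWitness_sort_dic.1) (pvDiffWitness_sort_dic.2) = pvDiffWitnessOut_sort_dic.2 ∧ pvDiffWitnessOut_sort_dic.1 ≠ pvDiffWitnessOut_sort_dic.2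
def Claim_exact_sort_dic : Prop := ∀ (d : List (String × Int)) (n : Int), Dom_sort_dic d n → D_sort_dic d n → sort_dic d n ≠ sort_dic_alt d n

-- ===== LEMMAS AND PROOFS =====
-- A's loop over any list takes exactly the first (n - count + 1) elements when count ≤ n
theorem sortDicLoop_take (n : Int) (dic : List (String × Int)) :
    ∀ (count : Int) (acc : List (String × Int)), count ≤ n →
      sortDicLoop n dic count acc = acc ++ dic.take (n - count + 1).toNat := by
  induction dic with
  | nil => intro count acc _; simp [sortDicLoop]
  | cons k rest ih =>
      intro count acc hcn
      simp only [sortDicLoop]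
      by_cases h : count > n - 1
      · have hcount : count = n := by omega
        have h1 : (n - count + 1).toNat = 1 := by omega
        simp [h, h1]
      · have h2 : (n - count + 1).toNat = (n - (count + 1) + 1).toNat + 1 := by omega
        rw [if_neg h, ih (count + 1) (acc ++ [k]) (by omega), h2]
        simp

-- ===== VERDICT (by name: the statement is the Claim_ definition above) =====
theorem sort_dic_spec : Claim_unchanged_sort_dic := by
  intro d n _ hnD
  unfold D_sort_dic at hnD
  unfold sort_dic sort_dic_alt
  by_cases hd : d = []
  · subst hd; simp [sortDicLoop, PySem.List.sorted]
  · have hn : 1 ≤ n := by by_contra h; exact hnD ⟨by omega, hd⟩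
    rw [sortDicLoop_take n _ 1 [] hn]
    have h : (n - 1 + 1) = n := by omega
    rw [h]
    simp

theorem sort_dic_changed : Claim_changed_sort_dic := by unfold Claim_changed_sort_dic; decide

theorem sort_dic_tight : Claim_exact_sort_dic := by
  intro d n _ hD
  obtain ⟨hn, hd⟩ := hD
  unfold sort_dic sort_dic_alt
  have h0 : n.toNat = 0 := by omega
  rw [h0, List.take_zero]
  have hne : PySem.List.sorted d (fun kv => kv.2) ≠ [] := by
    rw [Ne, PySem.List.sorted_eq_nil_iff]; exact hd
  cases hs : PySem.List.sorted d (fun kv => kv.2) with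
  | nil => exact absurd hs hne
  | cons k rest =>
      simp only [sortDicLoop]
      rw [if_pos (by omega)]
      simp
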